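-- pv_equiv track=rewrite | github.com/ELthomasoPostfix/CodeTheorie | main.py | rec
-- ===== SOURCE A (Python) =====
-- import copy
--
-- def rec(nums, currStr, counter):
--     arrows = ""
--     for i in range(len(nums)):
--         num = nums[i]
--         newStr = currStr + str(num)
--         if len(nums) == 1:
--             counter += 1
--             newStr += f" | {counter}"
--         arrows += f"\"{currStr}\" -> \"{newStr}\" [label=\"{i}\", fontcolor=\"blue\"]\n"
--
--         cpy = copy.deepcopy(nums)
--         cpy.remove(num)
--         result = rec(cpy, newStr, counter)
--         arrows += result[0]
--         counter = result[1]
--     return arrows, counter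
-- ===== SOURCE B (Python) =====
-- def rec(nums, currStr, counter):
--     out = ""
--     # stack of (parentStr, remaining_nums, child_index); end of list = top
--     stack = [(currStr, nums, i) for i in range(len(nums) - 1, -1, -1)]
--     while stack:
--         parent, ns, i = stack.pop()
--         num = ns[i]
--         newStr = parent + str(num)
--         if len(ns) == 1:
--             counter += 1
--             newStr += f" | {counter}"
--         out += f"\"{parent}\" -> \"{newStr}\" [label=\"{i}\", fontcolor=\"blue\"]\n"
--         rest = ns[:]
--         rest.remove(num)
--         stack.extend((newStr, rest, j) for j in range(len(rest) - 1, -1, -1))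
--     return out, counter
-- ===== Notes on version B (the rewrite author's own statement) =====
-- stated objective: alternative
-- what changed: Replaces A's recursive DFS (deepcopy + recursion per child) by an iterative loop over an explicit stack of (parentString, remainingNums, childIndex) frames with one external counter, emitting edges in the same pre-order.
import Mathlib
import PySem

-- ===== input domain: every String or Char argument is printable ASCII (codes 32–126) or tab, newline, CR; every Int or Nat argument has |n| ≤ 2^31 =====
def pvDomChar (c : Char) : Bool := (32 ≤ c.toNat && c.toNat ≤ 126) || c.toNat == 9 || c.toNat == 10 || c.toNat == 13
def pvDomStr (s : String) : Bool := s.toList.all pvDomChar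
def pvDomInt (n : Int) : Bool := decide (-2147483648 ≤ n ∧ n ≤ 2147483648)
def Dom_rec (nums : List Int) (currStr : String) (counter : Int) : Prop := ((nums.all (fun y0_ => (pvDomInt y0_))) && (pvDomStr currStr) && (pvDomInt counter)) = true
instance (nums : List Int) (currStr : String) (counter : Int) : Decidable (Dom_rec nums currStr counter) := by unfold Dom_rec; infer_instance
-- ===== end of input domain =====

-- B replaces A's recursive DFS by an iterative traversal over an explicit stack of
-- (parentString, remainingNums, childIndex) frames with one external counter (objective: alternative decomposition).

-- the edge line both programs emit (shared literal formatting)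
def pvEdge (parent child : String) (i : Nat) : String :=
  "\"" ++ parent ++ "\" -> \"" ++ child ++ "\" [label=\"" ++ PySem.Int.toStr (Int.ofNat i) ++ "\", fontcolor=\"blue\"]\n"

-- ===== PORT A =====
-- fueled transliteration of A's recursion; rec supplies fuel = len(nums), and every
-- recursive call removes exactly one element, so the fuel-0 branch is never reached.
def recA : Nat → List Int → String → Int → String × Int
  | 0, _, _, counter => ("", counter)
  | fuel+1, nums, currStr, counter =>
    (List.range nums.length).foldl
      (fun st i =>
        let num := nums.getD i 0
        let newStr := currStr ++ PySem.Int.toStr num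
        let q := if nums.length == 1 then (st.2 + 1, newStr ++ " | " ++ PySem.Int.toStr (st.2 + 1))
                 else (st.2, newStr)
        let cpy := (PySem.List.remove? nums num).getD []
        let result := recA fuel cpy q.2 q.1
        (st.1 ++ pvEdge currStr q.2 i ++ result.1, result.2))
      ("", counter)

def rec (nums : List Int) (currStr : String) (counter : Int) : String × Int :=
  recA nums.length nums currStr counter

-- ===== PORT B =====
-- the stack: head of the list = top of the stack (= end of Source B's python list);
-- Source B pushes child indices len-1 .. 0 onto the end, i.e. indices 0 .. len-1 in order at our head.
def pvChildren (p : String) (ns : List Int) : List (String × List Int × Nat) :=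
  (List.range ns.length).map (fun i => (p, ns, i))

-- fuel bound: total number of stack pops for a frame list of nums of length n
def pvBound : Nat → Nat
  | 0 => 0
  | n+1 => (n+1) * (1 + pvBound n)

-- the while-loop of Source B; one fuel unit per pop (the fuel-exhausted branch is unreachable
-- with the fuel rec_alt supplies)
def recB : Nat → List (String × List Int × Nat) → String → Int → String × Int
  | _, [], out, counter => (out, counter)
  | 0, _ :: _, out, counter => (out, counter)
  | fuel+1, (parent, ns, i) :: stack, out, counter =>
    let num := ns.getD i 0
    let newStr := parent ++ PySem.Int.toStr num
    let q := if ns.length == 1 then (counter + 1, newStr ++ " | " ++ PySem.Int.toStr (counter + 1))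
             else (counter, newStr)
    let rest := (PySem.List.remove? ns num).getD []
    recB fuel (pvChildren q.2 rest ++ stack) (out ++ pvEdge parent q.2 i) q.1

def rec_alt (nums : List Int) (currStr : String) (counter : Int) : String × Int :=
  recB (pvBound nums.length) (pvChildren currStr nums) "" counter

-- ===== PRECONDITION & SPEC =====
def Spec_rec (nums : List Int) (currStr : String) (counter : Int) (out : String × Int) : Prop := out = rec_alt nums currStr counter
instance (nums : List Int) (currStr : String) (counter : Int) (out : String × Int) : Decidable (Spec_rec nums currStr counter out) := by unfold Spec_rec; infer_instance

-- ===== CLAIM (what is proved, stated in full; the proofs are below) =====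
def Claim_equal_rec : Prop := ∀ (nums : List Int) (currStr : String) (counter : Int), Dom_rec nums currStr counter → Spec_rec nums currStr counter (rec nums currStr counter)

-- ===== LEMMAS AND PROOFS =====

-- the loop body of recA, named for the proofs
def pvStepA (fuel : Nat) (nums : List Int) (currStr : String) (st : String × Int) (i : Nat) : String × Int :=
  let num := nums.getD i 0
  let newStr := currStr ++ PySem.Int.toStr num
  let q := if nums.length == 1 then (st.2 + 1, newStr ++ " | " ++ PySem.Int.toStr (st.2 + 1))
           else (st.2, newStr)
  let cpy := (PySem.List.remove? nums num).getD []
  let result := recA fuel cpy q.2 q.1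
  (st.1 ++ pvEdge currStr q.2 i ++ result.1, result.2)

lemma recA_succ (f : Nat) (ns : List Int) (p : String) (c : Int) :
    recA (f+1) ns p c = (List.range ns.length).foldl (pvStepA f ns p) ("", c) := rfl

-- what one stack frame contributes: its edge plus its whole subtree (via recA)
def specTask : (String × List Int × Nat) → Int → String × Int
  | (p, ns, i), c =>
    let num := ns.getD i 0
    let q := if ns.length == 1 then (c + 1, p ++ PySem.Int.toStr num ++ " | " ++ PySem.Int.toStr (c + 1))
             else (c, p ++ PySem.Int.toStr num)
    let rest := (PySem.List.remove? ns num).getD []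
    let sub := recA (ns.length - 1) rest q.2 q.1
    (pvEdge p q.2 i ++ sub.1, sub.2)

def runSpec : List (String × List Int × Nat) → Int → String × Int
  | [], c => ("", c)
  | t :: ts, c =>
    let r := specTask t c
    let r2 := runSpec ts r.2
    (r.1 ++ r2.1, r2.2)

def pvCost (ts : List (String × List Int × Nat)) : Nat :=
  (ts.map (fun t => 1 + pvBound (t.2.1.length - 1))).sum

lemma pvCost_append (l1 l2 : List (String × List Int × Nat)) :
    pvCost (l1 ++ l2) = pvCost l1 + pvCost l2 := by
  simp [pvCost]

lemma pvCost_children (p : String) (ns : List Int) : pvCost (pvChildren p ns) = pvBound ns.length := by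
  cases h : ns.length with
  | zero => simp [pvCost, pvChildren, h, pvBound]
  | succ m =>
    simp only [pvCost, pvChildren, h, List.map_map]
    rw [show ((fun t => 1 + pvBound ((t.2.1 : List Int).length - 1)) ∘ fun i => ((p, ns, i) : String × List Int × Nat))
          = (fun _ => 1 + pvBound m) by funext j; simp [h]]
    simp [List.map_const', List.sum_replicate, pvBound]

lemma foldA (f : Nat) (ns : List Int) (p : String) (hf : f = ns.length - 1) :
    ∀ (idxs : List Nat) (s : String) (c : Int),
      idxs.foldl (pvStepA f ns p) (s, c)
        = (s ++ (runSpec (idxs.map (fun i => (p, ns, i))) c).1,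
           (runSpec (idxs.map (fun i => (p, ns, i))) c).2) := by
  intro idxs
  induction idxs with
  | nil => intro s c; simp [runSpec]
  | cons i is ih =>
    intro s c
    simp only [List.foldl_cons, List.map_cons, runSpec]
    rw [show pvStepA f ns p (s, c) i
        = (s ++ (specTask (p, ns, i) c).1, (specTask (p, ns, i) c).2) by
          simp [pvStepA, specTask, hf, String.append_assoc]]
    rw [ih]
    simp [String.append_assoc]

lemma runSpec_append (l1 l2 : List (String × List Int × Nat)) :
    ∀ c : Int, runSpec (l1 ++ l2) c
      = ((runSpec l1 c).1 ++ (runSpec l2 (runSpec l1 c).2).1, (runSpec l2 (runSpec l1 c).2).2) := by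
  induction l1 with
  | nil => intro c; simp [runSpec]
  | cons t ts ih => intro c; simp [runSpec, ih, String.append_assoc]

lemma recA_spec (ns : List Int) (p : String) (c : Int) :
    recA ns.length ns p c = runSpec (pvChildren p ns) c := by
  cases h : ns.length with
  | zero =>
    have h0 : ns = [] := List.length_eq_zero_iff.mp h
    subst h0
    simp [recA, pvChildren, runSpec]
  | succ m =>
    rw [recA_succ m ns p c, foldA m ns p (by omega) (List.range ns.length) "" c]
    simp [pvChildren]

lemma recB_run : ∀ (fuel : Nat) (tasks stack : List (String × List Int × Nat)) (out : String) (c : Int),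
    (∀ t ∈ tasks, t.2.2 < t.2.1.length) → pvCost tasks ≤ fuel →
    recB fuel (tasks ++ stack) out c
      = recB (fuel - pvCost tasks) stack (out ++ (runSpec tasks c).1) (runSpec tasks c).2 := by
  intro fuel
  induction fuel using Nat.strong_induction_on with
  | _ fuel IH =>
    intro tasks stack out c hvalid hcost
    match tasks with
    | [] => simp [runSpec, pvCost]
    | (p, ns, i) :: ts =>
      have hi : i < ns.length := hvalid (p, ns, i) (by simp)
      have hmem : ns.getD i 0 ∈ ns := by
        rw [List.getD_eq_getElem ns 0 hi]; exact List.getElem_mem hi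
      have hrest : (PySem.List.remove? ns (ns.getD i 0)).getD [] = ns.erase (ns.getD i 0) := by
        rw [PySem.List.remove?_eq_some_erase _ _ hmem]; rfl
      have hrlen : (ns.erase (ns.getD i 0)).length = ns.length - 1 :=
        List.length_erase_of_mem hmem
      have hcost_cons : pvCost ((p, ns, i) :: ts) = 1 + pvBound (ns.length - 1) + pvCost ts := by
        simp [pvCost]
      match fuel with
      | 0 => exfalso; rw [hcost_cons] at hcost; omega
      | f + 1 =>
        simp only [List.cons_append, recB]
        rw [hrest]
        set q := if ns.length == 1
            then (c + 1, p ++ PySem.Int.toStr (ns.getD i 0) ++ " | " ++ PySem.Int.toStr (c + 1))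
            else (c, p ++ PySem.Int.toStr (ns.getD i 0)) with hq
        set rest := ns.erase (ns.getD i 0) with hrestdef
        have hC2 : pvCost (pvChildren q.2 rest ++ ts) = pvBound (ns.length - 1) + pvCost ts := by
          rw [pvCost_append, pvCost_children, hrlen]
        have hvalid2 : ∀ t ∈ pvChildren q.2 rest ++ ts, t.2.2 < t.2.1.length := by
          intro t ht
          rcases List.mem_append.mp ht with h1 | h2
          · rcases List.mem_map.mp (by simpa [pvChildren] using h1 :
              t ∈ (List.range rest.length).map (fun j => (q.2, rest, j))) with ⟨j, hj, rfl⟩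
            simpa using List.mem_range.mp hj
          · exact hvalid t (by simp [h2])
        rw [show pvChildren q.2 rest ++ (ts ++ stack) = (pvChildren q.2 rest ++ ts) ++ stack by simp]
        rw [IH f (by omega) _ stack _ q.1 hvalid2 (by rw [hC2]; rw [hcost_cons] at hcost; omega)]
        have hA : runSpec (pvChildren q.2 rest) q.1 = recA (ns.length - 1) rest q.2 q.1 := by
          rw [← hrlen]; exact (recA_spec rest q.2 q.1).symm
        have hfuel : f - pvCost (pvChildren q.2 rest ++ ts) = f + 1 - pvCost ((p, ns, i) :: ts) := by
          rw [hC2, hcost_cons]; rw [hcost_cons] at hcost; omega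
        rw [runSpec_append, hA, hfuel]
        have hR : runSpec ((p, ns, i) :: ts) c
            = ((pvEdge p q.2 i ++ (recA (ns.length - 1) rest q.2 q.1).1)
                ++ (runSpec ts (recA (ns.length - 1) rest q.2 q.1).2).1,
               (runSpec ts (recA (ns.length - 1) rest q.2 q.1).2).2) := by
          simp only [runSpec, specTask, hrest, ← hq]
        rw [hR]
        simp [String.append_assoc]

-- ===== VERDICT (by name: the statement is the Claim_ definition above) =====
theorem rec_spec : Claim_equal_rec := by
  intro nums currStr counter _
  unfold Spec_rec rec rec_alt
  rw [recA_spec]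
  rw [show pvChildren currStr nums = pvChildren currStr nums ++ [] by simp,
      recB_run (pvBound nums.length) _ [] "" counter
        (by intro t ht; rcases List.mem_map.mp (by simpa [pvChildren, List.append_nil] using ht : t ∈ (List.range nums.length).map (fun i => (currStr, nums, i))) with ⟨j, hj, rfl⟩; simpa using List.mem_range.mp hj)
        (by rw [pvCost_children])]
  simp [recB]
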